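-- pv_equiv track=rewrite | github.com/yassataiseer/youtube-coding-solutions | Breaking-down/j3.py | shifts
-- ===== SOURCE A (Python) =====
-- def solve(data,location):
--     answer = []
--     prev_data = data[0:location]
--     next_data = data[location:len(data)]
--     for i in range(len(prev_data)):
--         answer.append(sum(prev_data[i:len(prev_data)]))
--     for i in range(len(next_data)):
--         answer.append(sum(next_data[0:i+1]))
--     return answer
--
-- def shifts(locations):
--     answer = []
--     for i in range(len(locations)):
--         #[0,2,10,15,20]
--         if i == 0:
--             answer.append(solve(locations,i))
--         else:
--             last = locations.pop(i)
--             locations.insert(i-1,last)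
--             answer.append(solve(locations,i))
--     return answer
-- ===== SOURCE B (Python) =====
-- def shifts(locations):
--     # O(n^2) via prefix sums; does NOT mutate the argument (A does).
--     n = len(locations)
--     P = [0]
--     s = 0
--     for v in locations:
--         s += v
--         P.append(s)
--     return [[P[i + 1] - P[k + 1] if k < i else P[1] + P[k + 1] - P[i + 1]
--              for k in range(n)]
--             for i in range(n)]
-- ===== Notes on version B (the rewrite author's own statement) =====
-- stated objective: faster
-- what changed: B computes one prefix-sum table of the input and reads every entry of every shifted row as an O(1) difference of prefix sums, instead of A's rebuilding each shifted list by pop/insert and re-summing a slice for every entry.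
import Mathlib
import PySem

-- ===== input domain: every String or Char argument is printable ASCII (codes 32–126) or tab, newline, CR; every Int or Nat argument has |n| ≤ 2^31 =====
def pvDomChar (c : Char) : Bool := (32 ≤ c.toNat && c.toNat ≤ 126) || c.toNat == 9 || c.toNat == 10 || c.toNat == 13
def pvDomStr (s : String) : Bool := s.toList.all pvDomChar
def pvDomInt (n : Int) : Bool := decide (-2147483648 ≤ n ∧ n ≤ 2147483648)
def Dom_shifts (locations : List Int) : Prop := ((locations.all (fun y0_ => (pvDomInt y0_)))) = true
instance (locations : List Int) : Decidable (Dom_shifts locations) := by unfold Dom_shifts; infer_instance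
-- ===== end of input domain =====

-- B replaces A's O(n^3) re-summation over each shifted list by one prefix-sum table and
-- O(1) segment sums (O(n^2)); equivalence is about the RETURN value only: A mutates its
-- argument (pop/insert), B does not.

-- ===== PORT A =====
def solveA (data : List Int) (location : Nat) : List Int :=
  let prev_data := PySem.List.slice data (some 0) (some (location : Int))
  let next_data := PySem.List.slice data (some (location : Int)) (some (data.length : Int))
  let answer := (List.range prev_data.length).foldl
    (fun ans (i : Nat) => ans ++ [(PySem.List.slice prev_data (some (i : Int)) (some (prev_data.length : Int))).sum]) []
  (List.range next_data.length).foldl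
    (fun ans (i : Nat) => ans ++ [(PySem.List.slice next_data (some 0) (some ((i : Int) + 1))).sum]) answer

def shifts (locations : List Int) : List (List Int) :=
  ((List.range locations.length).foldl
    (fun (st : List Int × List (List Int)) i =>
      if i = 0 then (st.1, st.2 ++ [solveA st.1 i])
      else
        match PySem.List.pop? st.1 (i : Int) with
        | some (last, rest) =>
            let locs := PySem.List.insert rest ((i : Int) - 1) last
            (locs, st.2 ++ [solveA locs i])
        | none => (st.1, st.2)   -- unreachable: i < len(locations) throughout, pop never raises
      ) (locations, [])).2

-- ===== PORT B =====
-- P[j] looked up with getD default 0: every index used is in range, so the default is never taken.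
def pgB (P : List Int) (j : Nat) : Int := PySem.List.pyGetD P (j : Int) 0

def shifts_alt (locations : List Int) : List (List Int) :=
  let n := locations.length
  let P := (locations.foldl (fun (st : List Int × Int) v => (st.1 ++ [st.2 + v], st.2 + v)) ([0], 0)).1
  (List.range n).map (fun i => (List.range n).map (fun k =>
    if k < i then pgB P (i + 1) - pgB P (k + 1)
    else pgB P 1 + pgB P (k + 1) - pgB P (i + 1)))

-- ===== PRECONDITION & SPEC =====
def Spec_shifts (locations : List Int) (out : List (List Int)) : Prop := out = shifts_alt locations
instance (locations : List Int) (out : List (List Int)) : Decidable (Spec_shifts locations out) := by unfold Spec_shifts; infer_instance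

-- ===== CLAIM (what is proved, stated in full; the proofs are below) =====
def Claim_equal_shifts : Prop := ∀ (locations : List Int), Dom_shifts locations → Spec_shifts locations (shifts locations)

-- ===== LEMMAS AND PROOFS =====

lemma solveA_eq (data : List Int) (loc : Nat) (h : loc ≤ data.length) :
    solveA data loc
      = (List.range loc).map (fun j => ((data.take loc).drop j).sum)
        ++ (List.range (data.length - loc)).map (fun j => ((data.drop loc).take (j + 1)).sum) := by
  unfold solveA
  rw [PySem.List.foldl_append_singleton_eq_map, PySem.List.foldl_append_singleton_eq_map, List.nil_append]
  rw [PySem.List.slice_zero_start, PySem.List.slice_to_natCast, PySem.List.slice_natCast]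
  have hp : (data.take loc).length = loc := by simp [h]
  have hn : ((data.drop loc).take (data.length - loc)) = data.drop loc := by
    apply List.take_of_length_le; simp
  rw [hn, hp]
  have hn2 : (data.drop loc).length = data.length - loc := by simp
  rw [hn2]
  congr 1
  · apply List.map_congr_left; intro j hj
    simp only [List.mem_range] at hj
    congr 1
    rw [PySem.List.slice_natCast]
    apply List.take_of_length_le
    simp; omega
  · apply List.map_congr_left; intro j _
    have hc : ((j : Int) + 1) = ((j + 1 : Nat) : Int) := by push_cast; ring
    rw [PySem.List.slice_zero_start, hc, PySem.List.slice_to_natCast]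

def Lrot (x : Int) (t : List Int) (i : Nat) : List Int := t.take i ++ x :: t.drop i

lemma sum_drop_take (t : List Int) (j i : Nat) (hj : j ≤ i) :
    ((t.take i).drop j).sum = (t.take i).sum - (t.take j).sum := by
  have h := List.sum_take_add_sum_drop (t.take i) j
  rw [List.take_take] at h
  rw [Nat.min_eq_left hj] at h
  omega

lemma rowA_eq (x : Int) (t : List Int) (i : Nat) (hi : i ≤ t.length) :
    solveA (Lrot x t i) i
      = (List.range (t.length + 1)).map (fun k =>
          if k < i then ((x :: t).take (i + 1)).sum - ((x :: t).take (k + 1)).sum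
          else ((x :: t).take 1).sum + ((x :: t).take (k + 1)).sum - ((x :: t).take (i + 1)).sum) := by
  have hlen : (Lrot x t i).length = t.length + 1 := by simp [Lrot]
  have htk : (Lrot x t i).take i = t.take i := by
    rw [Lrot, List.take_append_of_le_length (by simpa using hi)]
    rw [List.take_take, Nat.min_self]
  have hdr : (Lrot x t i).drop i = x :: t.drop i := by
    rw [Lrot, List.drop_append_of_le_length (by simpa using hi)]
    simp [List.drop_eq_nil_of_le]
  rw [solveA_eq _ _ (by omega), hlen, htk, hdr]
  have hsplit : t.length + 1 = i + (t.length + 1 - i) := by omega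
  rw [hsplit, List.range_add, List.map_append]
  congr 1
  · apply List.map_congr_left; intro j hj
    simp only [List.mem_range] at hj
    rw [if_pos hj, sum_drop_take t j i (by omega)]
    simp only [List.take_succ_cons, List.sum_cons]
    ring
  · have hfix : i + (t.length + 1 - i) - i = t.length + 1 - i := by omega
    rw [hfix, List.map_map]
    apply List.map_congr_left; intro j hj
    simp only [List.mem_range] at hj
    simp only [Function.comp_def]
    rw [if_neg (by omega)]
    simp only [List.take_succ_cons, List.sum_cons, List.take_add,
      List.sum_append]
    simp
    ring

lemma eraseIdx_mid (l1 l2 : List Int) (a b : Int) :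
    (l1 ++ a :: b :: l2).eraseIdx (l1.length + 1) = l1 ++ a :: l2 := by
  induction l1 with
  | nil => rfl
  | cons h tl ih => simpa using ih

lemma getElem_mid (l1 l2 : List Int) (a b : Int) (h : l1.length + 1 < (l1 ++ a :: b :: l2).length) :
    (l1 ++ a :: b :: l2)[l1.length + 1] = b := by
  rw [List.getElem_append_right (by omega)]
  simp

lemma pop_mid (l1 l2 : List Int) (a b : Int) :
    PySem.List.pop? (l1 ++ a :: b :: l2) ((l1.length + 1 : Nat) : Int) = some (b, l1 ++ a :: l2) := by
  rw [PySem.List.pop?_natCast _ _ (by simp)]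
  congr 1
  exact Prod.ext (getElem_mid l1 l2 a b (by simp)) (eraseIdx_mid l1 l2 a b)

lemma foldA (x : Int) (t : List Int) (j : Nat) (hj : j ≤ t.length + 1) :
    (List.range j).foldl
      (fun (st : List Int × List (List Int)) i =>
        if i = 0 then (st.1, st.2 ++ [solveA st.1 i])
        else
          match PySem.List.pop? st.1 (i : Int) with
          | some (last, rest) =>
              let locs := PySem.List.insert rest ((i : Int) - 1) last
              (locs, st.2 ++ [solveA locs i])
          | none => (st.1, st.2))
      (x :: t, [])
    = (Lrot x t (j - 1), (List.range j).map (fun i => solveA (Lrot x t i) i)) := by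
  induction j with
  | zero => simp [Lrot]
  | succ m ih =>
    rw [List.range_succ, List.foldl_append, List.foldl_cons, List.foldl_nil,
      ih (by omega)]
    cases m with
    | zero =>
      simp [Lrot]
    | succ m' =>
      have hm' : m' < t.length := by omega
      simp only [if_neg (by omega : ¬ m' + 1 = 0)]
      have hform : Lrot x t m' = t.take m' ++ x :: t[m'] :: t.drop (m' + 1) := by
        rw [Lrot, List.drop_eq_getElem_cons hm']
      have hlt : (t.take m').length = m' := by simp; omega
      have hpop2 : PySem.List.pop? (Lrot x t m') ((m' + 1 : Nat) : Int)
          = some (t[m'], t.take m' ++ x :: t.drop (m' + 1)) := by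
        rw [hform]
        have hp := pop_mid (t.take m') (t.drop (m' + 1)) x (t[m'])
        rwa [hlt] at hp
      simp only [Nat.add_sub_cancel]
      rw [hpop2]
      have hcast : ((m' + 1 : Nat) : Int) - 1 = ((m' : Nat) : Int) := by push_cast; ring
      simp only [hcast]
      rw [PySem.List.insert_natCast _ _ _ (by simp; omega)]
      have htke : (t.take m' ++ x :: t.drop (m' + 1)).take m' = t.take m' := by
        exact List.take_left' hlt
      have hdre : (t.take m' ++ x :: t.drop (m' + 1)).drop m' = x :: t.drop (m' + 1) := by
        exact List.drop_left' hlt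
      rw [htke, hdre]
      have hL : t.take m' ++ t[m'] :: x :: t.drop (m' + 1) = Lrot x t (m' + 1) := by
        have hts : t.take (m' + 1) = t.take m' ++ [t[m']] := by
          rw [List.take_add_one, List.getElem?_eq_getElem hm']
          simp
        rw [Lrot, hts]
        simp only [List.append_assoc, List.singleton_append]
      rw [hL, List.range_succ, List.map_append]
      simp

lemma pg_eq' (xs : List Int) (j : Nat) (hj : j ≤ xs.length) :
    pgB (([0] : List Int) ++ (List.range xs.length).map (fun j => 0 + (xs.take (j + 1)).sum)) j
      = (xs.take j).sum := by
  unfold pgB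
  rw [PySem.List.pyGetD_natCast]
  cases j with
  | zero => simp
  | succ m =>
    have hm : m < xs.length := by omega
    rw [List.getD_eq_getElem?_getD]
    simp [hm]

lemma prefixP (xs p : List Int) (s : Int) :
    (xs.foldl (fun (st : List Int × Int) v => (st.1 ++ [st.2 + v], st.2 + v)) (p, s)).1
      = p ++ (List.range xs.length).map (fun j => s + (xs.take (j + 1)).sum) := by
  induction xs generalizing p s with
  | nil => simp
  | cons v xs ih =>
    simp only [List.foldl_cons]
    rw [ih]
    simp only [List.length_cons, List.range_succ_eq_map, List.map_cons, List.map_map]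
    simp [Function.comp_def, List.append_assoc]
    intro a _; ring

lemma shifts_eq_alt (xs : List Int) : shifts xs = shifts_alt xs := by
  cases xs with
  | nil => rfl
  | cons x t =>
    unfold shifts shifts_alt
    simp only [List.length_cons]
    rw [foldA x t (t.length + 1) (le_refl _)]
    rw [prefixP]
    simp only [List.length_cons]
    apply List.map_congr_left
    intro i hi
    simp only [List.mem_range] at hi
    rw [rowA_eq x t i (by omega)]
    apply List.map_congr_left
    intro k hk
    simp only [List.mem_range] at hk
    have hpg : ∀ j, j ≤ t.length + 1 →
        pgB (([0] : List Int) ++ (List.range (t.length + 1)).map (fun j => 0 + ((x :: t).take (j + 1)).sum)) j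
          = ((x :: t).take j).sum := by
      intro j hj
      have h := pg_eq' (x :: t) j (by simpa using hj)
      simpa using h
    split_ifs with h
    · rw [hpg (i + 1) (by omega), hpg (k + 1) (by omega)]
    · rw [hpg 1 (by omega), hpg (k + 1) (by omega), hpg (i + 1) (by omega)]

-- ===== VERDICT (by name: the statement is the Claim_ definition above) =====
theorem shifts_spec : Claim_equal_shifts := by
  intro locations _
  show shifts locations = shifts_alt locations
  exact shifts_eq_alt locations
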